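-- pv_equiv track=rewrite | github.com/maomao905/algo | count-of-triplets-in-an-array-i-j-k-such-that-i-j-k-and-ak-ai-aj.py | solve
-- ===== SOURCE A (Python) =====
-- def solve(arr):
--     N = len(arr)
--     ans = 0
--     for i in range(N):
--         cnt = 0
--         for j in range(i+1, N):
--             if arr[j] > arr[i]:
--                 cnt += 1
--             else:
--                 # if arr[j] < arr[i] -> we can consider j is k
--                 ans += cnt
--     return ans
-- ===== SOURCE B (Python) =====
-- def solve(arr):
--     # Same count, grouped by (i, j) instead of (i, k): scan the tail right-to-left,
--     # maintaining how many valid k's (elements <= arr[i]) lie to the right.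
--     ans = 0
--     for i in range(len(arr)):
--         x = arr[i]
--         s = 0
--         for y in reversed(arr[i+1:]):
--             if y > x:
--                 ans += s
--             else:
--                 s += 1
--     return ans
-- ===== Notes on version B (the rewrite author's own statement) =====
-- stated objective: alternative
-- what changed: B scans each tail right-to-left maintaining the count of valid third elements (<= arr[i]) to the right and adds it at each middle element, instead of A's left-to-right scan that counts middle elements and adds the count at each third element.
import Mathlib
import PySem

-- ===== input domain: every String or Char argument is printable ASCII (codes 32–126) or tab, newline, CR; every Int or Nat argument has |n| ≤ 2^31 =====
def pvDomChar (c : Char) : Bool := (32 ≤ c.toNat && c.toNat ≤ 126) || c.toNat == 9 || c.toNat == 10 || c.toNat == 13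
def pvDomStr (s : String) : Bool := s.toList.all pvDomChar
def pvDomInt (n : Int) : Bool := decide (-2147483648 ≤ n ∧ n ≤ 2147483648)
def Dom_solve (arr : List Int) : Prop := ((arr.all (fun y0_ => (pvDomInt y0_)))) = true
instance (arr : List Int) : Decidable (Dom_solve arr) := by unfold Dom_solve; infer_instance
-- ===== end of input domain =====

-- B replaces A's left-to-right tail scan (count middles, add at each third element)
-- by a right-to-left tail scan (count third elements, add at each middle): alternative traversal, same cost.

-- ===== PORT A =====
-- indices i, j always lie in range, so pyGetD with default 0 is exact here
def solve (arr : List Int) : Int :=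
  let N : Int := PySem.List.len arr
  (PySem.List.pyRange 0 N 1).foldl (fun ans i =>
    ((PySem.List.pyRange (i + 1) N 1).foldl
      (fun (st : Int × Int) j =>
        if PySem.List.pyGetD arr j 0 > PySem.List.pyGetD arr i 0 then (st.1 + 1, st.2)
        else (st.1, st.2 + st.1))
      (0, ans)).2) 0

-- ===== PORT B =====
def solve_alt (arr : List Int) : Int :=
  (PySem.List.pyRange 0 (PySem.List.len arr) 1).foldl (fun ans i =>
    let x := PySem.List.pyGetD arr i 0
    (((PySem.List.slice arr (some (i + 1)) none).reverse).foldl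
      (fun (st : Int × Int) y =>
        if y > x then (st.1, st.2 + st.1)
        else (st.1 + 1, st.2))
      (0, ans)).2) 0

-- ===== PRECONDITION & SPEC =====
def Spec_solve (arr : List Int) (out : Int) : Prop := out = solve_alt arr
instance (arr : List Int) (out : Int) : Decidable (Spec_solve arr out) := by unfold Spec_solve; infer_instance

-- ===== CLAIM (what is proved, stated in full; the proofs are below) =====
def Claim_equal_solve : Prop := ∀ (arr : List Int), Dom_solve arr → Spec_solve arr (solve arr)

-- ===== LEMMAS AND PROOFS =====

-- number of pairs (j,k), j<k, with t[j] > x and t[k] ≤ x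
def pvPairs (x : Int) : List Int → Int
  | [] => 0
  | y :: t => (if y > x then (t.countP (fun z => decide (z ≤ x)) : Int) else 0) + pvPairs x t

def pvLe (x : Int) (t : List Int) : Int := (t.countP (fun z => decide (z ≤ x)) : Int)
def pvGt (x : Int) (t : List Int) : Int := (t.countP (fun z => decide (z > x)) : Int)

lemma fwd_fold (x : Int) (t : List Int) : ∀ c a : Int,
    t.foldl (fun (st : Int × Int) y => if y > x then (st.1 + 1, st.2) else (st.1, st.2 + st.1)) (c, a)
      = (c + pvGt x t, a + pvPairs x t + c * pvLe x t) := by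
  induction t with
  | nil => intro c a; simp [pvPairs, pvGt, pvLe]
  | cons y t ih =>
    intro c a
    by_cases h : y > x
    · simp only [List.foldl_cons, if_pos h, ih]
      have hle : ¬ (y ≤ x) := by omega
      simp [pvPairs, pvGt, pvLe, h, hle, Prod.ext_iff]
      try constructor
      all_goals ring
    · simp only [List.foldl_cons, if_neg h, ih]
      have hle : y ≤ x := by omega
      simp [pvPairs, pvGt, pvLe, h, hle, Prod.ext_iff]
      try constructor
      all_goals ring

lemma bwd_fold (x : Int) (t : List Int) : ∀ s a : Int,
    t.reverse.foldl (fun (st : Int × Int) y => if y > x then (st.1, st.2 + st.1) else (st.1 + 1, st.2)) (s, a)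
      = (s + pvLe x t, a + pvPairs x t + s * pvGt x t) := by
  induction t with
  | nil => intro s a; simp [pvPairs, pvGt, pvLe]
  | cons y t ih =>
    intro s a
    rw [List.reverse_cons, List.foldl_append, ih]
    by_cases h : y > x
    · have hle : ¬ (y ≤ x) := by omega
      simp [pvPairs, pvGt, pvLe, h, hle, Prod.ext_iff]
      try constructor
      all_goals ring
    · have hle : y ≤ x := by omega
      simp [pvPairs, pvGt, pvLe, h, hle, Prod.ext_iff]
      try constructor
      all_goals ring

lemma inner_eq (arr : List Int) (i : Int) (hi : 0 ≤ i) (a : Int) :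
    ((PySem.List.pyRange (i + 1) (PySem.List.len arr) 1).foldl
      (fun (st : Int × Int) j =>
        if PySem.List.pyGetD arr j 0 > PySem.List.pyGetD arr i 0 then (st.1 + 1, st.2)
        else (st.1, st.2 + st.1)) (0, a)).2
    = (((PySem.List.slice arr (some (i + 1)) none).reverse).foldl
      (fun (st : Int × Int) y =>
        if y > PySem.List.pyGetD arr i 0 then (st.1, st.2 + st.1)
        else (st.1 + 1, st.2)) (0, a)).2 := by
  have h1 : (0 : Int) ≤ i + 1 := by omega
  rw [PySem.List.slice_from arr h1]
  rw [PySem.List.foldl_pyRange_pyGetD arr 0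
      (fun (st : Int × Int) y =>
        if y > PySem.List.pyGetD arr i 0 then (st.1 + 1, st.2) else (st.1, st.2 + st.1))
      (0, a) h1]
  rw [fwd_fold, bwd_fold]
  simp

-- ===== VERDICT (by name: the statement is the Claim_ definition above) =====
theorem solve_spec : Claim_equal_solve := by
  intro arr _
  unfold Spec_solve solve solve_alt
  simp only []
  apply PySem.List.foldl_congr_mem
  intro a i hi
  have hi0 : 0 ≤ i := ((PySem.List.mem_pyRange_one).1 hi).1
  exact inner_eq arr i hi0 a
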